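-- pv_equiv track=rewrite | github.com/aarthild/Python-van | EVENODDDIV.py | count_even_odd_divisors
-- ===== SOURCE A (Python) =====
-- def count_even_odd_divisors(n):
--     e = 0  # Counter for even divisors
--     o = 0  # Counter for odd divisors
--     for i in range(1, n + 1):
--         if n % i == 0:  # Check if i is a divisor of n
--             if i % 2 == 0:
--                 e += 1  # Count even divisor
--             else:
--                 o += 1  # Count odd divisor
--     return e, o
-- ===== SOURCE B (Python) =====
-- def count_even_odd_divisors(n):
--     e = 0
--     o = 0
--     i = 1
--     while i * i <= n:
--         if n % i == 0:
--             if i % 2 == 0: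
--                 e += 1
--             else:
--                 o += 1
--             j = n // i
--             if j != i:
--                 if j % 2 == 0:
--                     e += 1
--                 else:
--                     o += 1
--         i += 1
--     return e, o
-- ===== Notes on version B (the rewrite author's own statement) =====
-- stated objective: faster
-- what changed: B replaces A's full scan of 1..n with a while loop up to sqrt(n) that counts each divisor pair (i, n//i) by parity.
import Mathlib
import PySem

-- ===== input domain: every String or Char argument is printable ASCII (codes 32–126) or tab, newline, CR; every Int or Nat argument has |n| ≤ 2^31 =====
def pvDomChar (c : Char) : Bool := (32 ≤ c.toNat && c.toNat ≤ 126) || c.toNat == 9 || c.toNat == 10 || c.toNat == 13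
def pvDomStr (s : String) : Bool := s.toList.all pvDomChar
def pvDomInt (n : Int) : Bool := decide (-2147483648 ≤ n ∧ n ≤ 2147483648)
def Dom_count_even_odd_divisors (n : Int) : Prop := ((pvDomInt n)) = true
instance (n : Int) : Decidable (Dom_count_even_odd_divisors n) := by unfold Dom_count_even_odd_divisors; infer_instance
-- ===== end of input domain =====

-- B changes the algorithm: instead of A's full scan of 1..n it walks i up to √n and
-- counts each divisor pair (i, n//i) by parity (asymptotically faster; return value only).

-- ===== PORT A =====
def count_even_odd_divisors (n : Int) : List Int :=
  let eo := (PySem.List.pyRange 1 (n + 1) 1).foldl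
    (fun (eo : Int × Int) i =>
      if PySem.Int.mod n i = 0 then
        if PySem.Int.mod i 2 = 0 then (eo.1 + 1, eo.2) else (eo.1, eo.2 + 1)
      else eo) (0, 0)
  [eo.1, eo.2]

-- ===== PORT B =====
-- fuel makes the while loop structurally total; n.toNat + 1 iterations always suffice
def pvBLoop (n : Int) (i : Int) (e : Int) (o : Int) : Nat → Int × Int
  | 0 => (e, o)
  | fuel + 1 =>
    if i * i ≤ n then
      if PySem.Int.mod n i = 0 then
        let eo := if PySem.Int.mod i 2 = 0 then (e + 1, o) else (e, o + 1)
        let j := PySem.Int.floordiv n i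
        let eo2 :=
          if j ≠ i then
            if PySem.Int.mod j 2 = 0 then (eo.1 + 1, eo.2) else (eo.1, eo.2 + 1)
          else eo
        pvBLoop n (i + 1) eo2.1 eo2.2 fuel
      else pvBLoop n (i + 1) e o fuel
    else (e, o)

def count_even_odd_divisors_alt (n : Int) : List Int :=
  let eo := pvBLoop n 1 0 0 (n.toNat + 1)
  [eo.1, eo.2]

-- ===== PRECONDITION & SPEC =====
def Spec_count_even_odd_divisors (n : Int) (out : List Int) : Prop := out = count_even_odd_divisors_alt n
instance (n : Int) (out : List Int) : Decidable (Spec_count_even_odd_divisors n out) := by unfold Spec_count_even_odd_divisors; infer_instance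

-- ===== CLAIM (what is proved, stated in full; the proofs are below) =====
def Claim_equal_count_even_odd_divisors : Prop := ∀ (n : Int), Dom_count_even_odd_divisors n → Spec_count_even_odd_divisors n (count_even_odd_divisors n)

-- ===== LEMMAS AND PROOFS =====

-- parity predicates shared by the two counting characterisations
def pvEven (d : Nat) : Bool := decide (d % 2 = 0)
def pvOdd (d : Nat) : Bool := decide (d % 2 = 1)

-- divisors of N not yet handled by B's loop at index i: min(d, N/d) ≥ i
def pvCnt (N : Nat) (i : Nat) (p : Nat → Bool) : Nat :=
  ((N.divisors).filter (fun d => i ≤ d ∧ i ≤ N / d ∧ p d = true)).card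

-- divisors of N found by A's scan up to M
def pvACnt (N : Nat) (M : Nat) (p : Nat → Bool) : Nat :=
  ((Finset.Ico 1 (M + 1)).filter (fun d => d ∣ N ∧ p d = true)).card

lemma pvCnt_one (N : Nat) (hN : N ≠ 0) (p : Nat → Bool) :
    pvCnt N 1 p = ((N.divisors).filter (fun d => p d = true)).card := by
  unfold pvCnt
  congr 1
  apply Finset.filter_congr
  intro d hd
  have hdvd : d ∣ N := (Nat.mem_divisors.mp hd).1
  have hd0 : 0 < d := Nat.pos_of_mem_divisors hd
  have hle : d ≤ N := Nat.le_of_dvd (Nat.pos_of_ne_zero hN) hdvd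
  have : 0 < N / d := Nat.div_pos hle hd0
  constructor
  · rintro ⟨-, -, h⟩; exact h
  · intro h; exact ⟨hd0, this, h⟩

lemma pvCnt_done (N i : Nat) (h : N < i * i) (p : Nat → Bool) : pvCnt N i p = 0 := by
  unfold pvCnt
  rw [Finset.card_eq_zero, Finset.filter_eq_empty_iff]
  intro d hd
  rintro ⟨h1, h2, -⟩
  have hmul : i * i ≤ d * (N / d) := Nat.mul_le_mul h1 h2
  have : d * (N / d) ≤ N := by rw [Nat.mul_comm]; exact Nat.div_mul_le_self N d
  omega

lemma pvCnt_step_notdvd (N i : Nat) (_hN : N ≠ 0) (hndvd : ¬ i ∣ N) (p : Nat → Bool) :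
    pvCnt N i p = pvCnt N (i + 1) p := by
  unfold pvCnt
  congr 1
  apply Finset.ext
  intro d
  simp only [Finset.mem_filter, Nat.mem_divisors]
  constructor
  · rintro ⟨⟨hdvd, hN'⟩, h1, h2, hp⟩
    refine ⟨⟨hdvd, hN'⟩, ?_, ?_, hp⟩
    · have hdne : d ≠ i := by
        intro h
        exact hndvd (h ▸ hdvd)
      omega
    · have hne : N / d ≠ i := by
        intro h
        exact hndvd (h ▸ Nat.div_dvd_of_dvd hdvd)
      omega
  · rintro ⟨hmem, h1, h2, hp⟩
    exact ⟨hmem, by omega, by omega, hp⟩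

lemma pvCnt_step_pair (N i : Nat) (hN : N ≠ 0) (hi : 1 ≤ i) (hdvd : i ∣ N)
    (hsq : i * i ≤ N) (hne : N / i ≠ i) (p : Nat → Bool) :
    pvCnt N i p = pvCnt N (i + 1) p
      + (if p i then 1 else 0) + (if p (N / i) then 1 else 0) := by
  have hiN : i ≤ N / i := (Nat.le_div_iff_mul_le (by omega)).mpr hsq
  have hNi_dvd : N / i ∣ N := Nat.div_dvd_of_dvd hdvd
  have hdds : N / (N / i) = i := Nat.div_div_self hdvd hN
  have hunion :
      ((N.divisors).filter (fun d => i ≤ d ∧ i ≤ N / d ∧ p d = true))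
        = ((N.divisors).filter (fun d => i + 1 ≤ d ∧ i + 1 ≤ N / d ∧ p d = true))
          ∪ (({i, N / i} : Finset Nat).filter (fun d => p d = true)) := by
    apply Finset.ext
    intro d
    simp only [Finset.mem_union, Finset.mem_filter, Nat.mem_divisors,
      Finset.mem_insert, Finset.mem_singleton]
    constructor
    · rintro ⟨⟨hdvd', hN'⟩, h1, h2, hp⟩
      by_cases hcase : i + 1 ≤ d ∧ i + 1 ≤ N / d
      · exact Or.inl ⟨⟨hdvd', hN'⟩, hcase.1, hcase.2, hp⟩
      · right
        refine ⟨?_, hp⟩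
        rcases Nat.lt_or_ge d (i + 1) with h | h
        · left; omega
        · right
          have hNd : N / d = i := by omega
          have : N / (N / d) = d := Nat.div_div_self hdvd' hN'
          rw [hNd] at this
          omega
    · rintro (⟨hmem, h1, h2, hp⟩ | ⟨hd, hp⟩)
      · exact ⟨hmem, by omega, by omega, hp⟩
      · rcases hd with rfl | rfl
        · exact ⟨⟨hdvd, hN⟩, le_refl _, hiN, hp⟩
        · exact ⟨⟨hNi_dvd, hN⟩, hiN, by rw [hdds], hp⟩
  have hdisj : Disjoint
      ((N.divisors).filter (fun d => i + 1 ≤ d ∧ i + 1 ≤ N / d ∧ p d = true))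
      (({i, N / i} : Finset Nat).filter (fun d => p d = true)) := by
    rw [Finset.disjoint_left]
    intro d hd1 hd2
    simp only [Finset.mem_filter, Nat.mem_divisors] at hd1
    simp only [Finset.mem_filter, Finset.mem_insert, Finset.mem_singleton] at hd2
    rcases hd2.1 with rfl | rfl
    · omega
    · have := hd1.2.2.1
      rw [hdds] at this
      omega
  have hpair : (({i, N / i} : Finset Nat).filter (fun d => p d = true)).card
      = (if p i then 1 else 0) + (if p (N / i) then 1 else 0) := by
    rw [Finset.filter_insert, Finset.filter_singleton]
    split_ifs <;>
      simp_all [Finset.card_insert_of_notMem, Ne.symm hne]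
  unfold pvCnt
  rw [hunion, Finset.card_union_of_disjoint hdisj, hpair]
  omega

lemma pvCnt_step_square (N i : Nat) (hN : N ≠ 0) (hi : 1 ≤ i) (hdvd : i ∣ N)
    (hsq : i * i ≤ N) (heq : N / i = i) (p : Nat → Bool) :
    pvCnt N i p = pvCnt N (i + 1) p + (if p i then 1 else 0) := by
  have hdds : N / (N / i) = i := Nat.div_div_self hdvd hN
  have hunion :
      ((N.divisors).filter (fun d => i ≤ d ∧ i ≤ N / d ∧ p d = true))
        = ((N.divisors).filter (fun d => i + 1 ≤ d ∧ i + 1 ≤ N / d ∧ p d = true))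
          ∪ (({i} : Finset Nat).filter (fun d => p d = true)) := by
    apply Finset.ext
    intro d
    simp only [Finset.mem_union, Finset.mem_filter, Nat.mem_divisors,
      Finset.mem_singleton]
    constructor
    · rintro ⟨⟨hdvd', hN'⟩, h1, h2, hp⟩
      by_cases hcase : i + 1 ≤ d ∧ i + 1 ≤ N / d
      · exact Or.inl ⟨⟨hdvd', hN'⟩, hcase.1, hcase.2, hp⟩
      · right
        refine ⟨?_, hp⟩
        rcases Nat.lt_or_ge d (i + 1) with h | h
        · omega
        · have hNd : N / d = i := by omega
          have : N / (N / d) = d := Nat.div_div_self hdvd' hN'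
          rw [hNd, heq] at this
          omega
    · rintro (⟨hmem, h1, h2, hp⟩ | ⟨rfl, hp⟩)
      · exact ⟨hmem, by omega, by omega, hp⟩
      · exact ⟨⟨hdvd, hN⟩, le_refl _, by rw [heq], hp⟩
  have hdisj : Disjoint
      ((N.divisors).filter (fun d => i + 1 ≤ d ∧ i + 1 ≤ N / d ∧ p d = true))
      (({i} : Finset Nat).filter (fun d => p d = true)) := by
    rw [Finset.disjoint_left]
    intro d hd1 hd2
    simp only [Finset.mem_filter, Nat.mem_divisors] at hd1
    simp only [Finset.mem_filter, Finset.mem_singleton] at hd2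
    omega
  have hsingle : (({i} : Finset Nat).filter (fun d => p d = true)).card
      = (if p i then 1 else 0) := by
    rw [Finset.filter_singleton]
    split_ifs <;> simp
  unfold pvCnt
  rw [hunion, Finset.card_union_of_disjoint hdisj, hsingle]

-- B's loop computes the remaining counts
lemma pvBLoop_eq (N : Nat) (hN : N ≠ 0) :
    ∀ (fuel i : Nat) (e o : Int), 1 ≤ i → N < (i + fuel) * (i + fuel) →
      pvBLoop (N : Int) (i : Int) e o fuel
        = (e + (pvCnt N i pvEven : Int), o + (pvCnt N i pvOdd : Int)) := by
  intro fuel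
  induction fuel with
  | zero =>
    intro i e o hi hbound
    have hb : N < i * i := by simpa using hbound
    have hlt : ¬ ((i : Int) * (i : Int) ≤ (N : Int)) := by
      intro hc
      have : i * i ≤ N := by exact_mod_cast hc
      omega
    simp [pvBLoop, pvCnt_done N i hb]
  | succ fuel ih =>
    intro i e o hi hbound
    have hrec : ∀ e' o' : Int,
        pvBLoop (N : Int) ((i : Int) + 1) e' o' fuel
          = (e' + (pvCnt N (i + 1) pvEven : Int), o' + (pvCnt N (i + 1) pvOdd : Int)) := by
      intro e' o'
      have hb : N < (i + 1 + fuel) * (i + 1 + fuel) := by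
        have h : i + 1 + fuel = i + (fuel + 1) := by omega
        rw [h]
        exact hbound
      have h := ih (i + 1) e' o' (by omega) hb
      push_cast at h
      exact h
    by_cases hle : i * i ≤ N
    · have hleI : ((i : Int) * (i : Int) ≤ (N : Int)) := by exact_mod_cast hle
      have hmodNi : PySem.Int.mod (N : Int) (i : Int) = ((N % i : Nat) : Int) :=
        PySem.Int.mod_natCast N i
      have hfd : PySem.Int.floordiv (N : Int) (i : Int) = ((N / i : Nat) : Int) :=
        PySem.Int.floordiv_natCast N i
      have hmodi2 : PySem.Int.mod (i : Int) 2 = ((i % 2 : Nat) : Int) := by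
        exact_mod_cast PySem.Int.mod_natCast i 2
      have hmodj2 : PySem.Int.mod ((N / i : Nat) : Int) 2 = ((N / i % 2 : Nat) : Int) := by
        exact_mod_cast PySem.Int.mod_natCast (N / i) 2
      by_cases hdvd : i ∣ N
      · have hmod0 : PySem.Int.mod (N : Int) (i : Int) = 0 := by
          rw [hmodNi, Nat.mod_eq_zero_of_dvd hdvd]
          rfl
        have hpariff : ∀ m : Nat, m % 2 = 0 →
            PySem.Int.mod ((m : Nat) : Int) 2 = 0 := by
          intro m hm
          rw [show PySem.Int.mod ((m : Nat) : Int) 2 = ((m % 2 : Nat) : Int) by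
            exact_mod_cast PySem.Int.mod_natCast m 2, hm]
          rfl
        have hparne : ∀ m : Nat, m % 2 = 1 →
            PySem.Int.mod ((m : Nat) : Int) 2 ≠ 0 := by
          intro m hm
          rw [show PySem.Int.mod ((m : Nat) : Int) 2 = ((m % 2 : Nat) : Int) by
            exact_mod_cast PySem.Int.mod_natCast m 2, hm]
          decide
        by_cases hsqeq : N / i = i
        · -- perfect-square step: only i is counted
          have hjeq : ¬ ((PySem.Int.floordiv (N : Int) (i : Int)) ≠ (i : Int)) := by
            rw [hfd, hsqeq]
            simp
          have hstepE := pvCnt_step_square N i hN hi hdvd hle hsqeq pvEven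
          have hstepO := pvCnt_step_square N i hN hi hdvd hle hsqeq pvOdd
          by_cases hpar : i % 2 = 0
          · have h2 := hpariff i hpar
            have hp1 : pvEven i = true := by simp [pvEven, hpar]
            have hp2 : pvOdd i = false := by simp only [pvOdd]; simp; omega
            simp only [pvBLoop, if_pos hleI, if_pos hmod0, if_pos h2, if_neg hjeq]
            rw [hrec, hstepE, hstepO, hp1, hp2]
            simp only [Prod.mk.injEq]
            constructor <;> (push_cast; ring)
          · have hpar1 : i % 2 = 1 := by omega
            have h2 := hparne i hpar1
            have hp1 : pvEven i = false := by simp only [pvEven]; simp; omega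
            have hp2 : pvOdd i = true := by simp [pvOdd, hpar1]
            simp only [pvBLoop, if_pos hleI, if_pos hmod0, if_neg h2, if_neg hjeq]
            rw [hrec, hstepE, hstepO, hp1, hp2]
            simp only [Prod.mk.injEq]
            constructor <;> (push_cast; ring)
        · -- pair step: both i and N / i are counted
          have hjne : (PySem.Int.floordiv (N : Int) (i : Int)) ≠ (i : Int) := by
            rw [hfd]
            intro h
            exact hsqeq (by exact_mod_cast h)
          have hstepE := pvCnt_step_pair N i hN hi hdvd hle hsqeq pvEven
          have hstepO := pvCnt_step_pair N i hN hi hdvd hle hsqeq pvOdd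
          have hparj : N / i % 2 = 0 ∨ N / i % 2 = 1 := by omega
          by_cases hpar : i % 2 = 0
          · have h2 := hpariff i hpar
            have hp1 : pvEven i = true := by simp [pvEven, hpar]
            have hp2 : pvOdd i = false := by simp only [pvOdd]; simp; omega
            rcases hparj with hj | hj
            · have hj2 : PySem.Int.mod (PySem.Int.floordiv (N : Int) (i : Int)) 2 = 0 := by
                rw [hfd]
                exact hpariff _ hj
              have hq1 : pvEven (N / i) = true := by simp [pvEven, hj]
              have hq2 : pvOdd (N / i) = false := by simp only [pvOdd]; simp; omega
              simp only [pvBLoop, if_pos hleI, if_pos hmod0, if_pos h2, if_pos hjne,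
                if_pos hj2]
              rw [hrec, hstepE, hstepO, hp1, hp2, hq1, hq2]
              simp only [Prod.mk.injEq]
              constructor <;> (push_cast; ring)
            · have hj2 : PySem.Int.mod (PySem.Int.floordiv (N : Int) (i : Int)) 2 ≠ 0 := by
                rw [hfd]
                exact hparne _ hj
              have hq1 : pvEven (N / i) = false := by simp only [pvEven]; simp; omega
              have hq2 : pvOdd (N / i) = true := by simp [pvOdd, hj]
              simp only [pvBLoop, if_pos hleI, if_pos hmod0, if_pos h2, if_pos hjne,
                if_neg hj2]
              rw [hrec, hstepE, hstepO, hp1, hp2, hq1, hq2]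
              simp only [Prod.mk.injEq]
              constructor <;> (push_cast; ring)
          · have hpar1 : i % 2 = 1 := by omega
            have h2 := hparne i hpar1
            have hp1 : pvEven i = false := by simp only [pvEven]; simp; omega
            have hp2 : pvOdd i = true := by simp [pvOdd, hpar1]
            rcases hparj with hj | hj
            · have hj2 : PySem.Int.mod (PySem.Int.floordiv (N : Int) (i : Int)) 2 = 0 := by
                rw [hfd]
                exact hpariff _ hj
              have hq1 : pvEven (N / i) = true := by simp [pvEven, hj]
              have hq2 : pvOdd (N / i) = false := by simp only [pvOdd]; simp; omega
              simp only [pvBLoop, if_pos hleI, if_pos hmod0, if_neg h2, if_pos hjne,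
                if_pos hj2]
              rw [hrec, hstepE, hstepO, hp1, hp2, hq1, hq2]
              simp only [Prod.mk.injEq]
              constructor <;> (push_cast; ring)
            · have hj2 : PySem.Int.mod (PySem.Int.floordiv (N : Int) (i : Int)) 2 ≠ 0 := by
                rw [hfd]
                exact hparne _ hj
              have hq1 : pvEven (N / i) = false := by simp only [pvEven]; simp; omega
              have hq2 : pvOdd (N / i) = true := by simp [pvOdd, hj]
              simp only [pvBLoop, if_pos hleI, if_pos hmod0, if_neg h2, if_pos hjne,
                if_neg hj2]
              rw [hrec, hstepE, hstepO, hp1, hp2, hq1, hq2]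
              simp only [Prod.mk.injEq]
              constructor <;> (push_cast; ring)
      · have hmodne : PySem.Int.mod (N : Int) (i : Int) ≠ 0 := by
          rw [hmodNi]
          intro h
          have h' : N % i = 0 := by exact_mod_cast h
          exact hdvd (Nat.dvd_of_mod_eq_zero h')
        simp only [pvBLoop, if_pos hleI, if_neg hmodne]
        rw [hrec, pvCnt_step_notdvd N i hN hdvd pvEven, pvCnt_step_notdvd N i hN hdvd pvOdd]
    · have hb : N < i * i := by omega
      have hltI : ¬ ((i : Int) * (i : Int) ≤ (N : Int)) := by
        intro hc
        have : i * i ≤ N := by exact_mod_cast hc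
        omega
      simp [pvBLoop, hltI, pvCnt_done N i hb]

-- A's scan step
lemma pvACnt_succ (N M : Nat) (p : Nat → Bool) :
    pvACnt N (M + 1) p = pvACnt N M p + (if (M + 1) ∣ N ∧ p (M + 1) then 1 else 0) := by
  unfold pvACnt
  have hins : Finset.Ico 1 (M + 1 + 1) = insert (M + 1) (Finset.Ico 1 (M + 1)) := by
    apply Finset.ext
    intro d
    simp only [Finset.mem_Ico, Finset.mem_insert]
    omega
  rw [hins, Finset.filter_insert]
  by_cases h : (M + 1) ∣ N ∧ p (M + 1) = true
  · rw [if_pos h, if_pos h,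
      Finset.card_insert_of_notMem (by simp)]
  · rw [if_neg h, if_neg h]
    omega

-- A's fold over range(1, M+1) counts divisors among 1..M
lemma pvAFold_eq (N : Nat) : ∀ (M : Nat) (e o : Int),
    (PySem.List.pyRange 1 ((M : Int) + 1) 1).foldl
      (fun (eo : Int × Int) i =>
        if PySem.Int.mod (N : Int) i = 0 then
          if PySem.Int.mod i 2 = 0 then (eo.1 + 1, eo.2) else (eo.1, eo.2 + 1)
        else eo) (e, o)
      = (e + (pvACnt N M pvEven : Int), o + (pvACnt N M pvOdd : Int)) := by
  intro M
  induction M with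
  | zero =>
    intro e o
    rw [PySem.List.pyRange_one_eq_nil (by norm_num)]
    simp [pvACnt]
  | succ M ih =>
    intro e o
    have hsplit : PySem.List.pyRange 1 ((M : Int) + 1 + 1) 1
        = PySem.List.pyRange 1 ((M : Int) + 1) 1 ++ [(M : Int) + 1] := by
      exact PySem.List.pyRange_one_succ_right (by push_cast; omega)
    push_cast
    rw [hsplit, List.foldl_append, ih e o]
    simp only [List.foldl_cons, List.foldl_nil]
    have hmodN : PySem.Int.mod (N : Int) ((M : Int) + 1) = ((N % (M + 1) : Nat) : Int) := by
      exact_mod_cast PySem.Int.mod_natCast N (M + 1)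
    have hmod2 : PySem.Int.mod ((M : Int) + 1) 2 = (((M + 1) % 2 : Nat) : Int) := by
      exact_mod_cast PySem.Int.mod_natCast (M + 1) 2
    rw [pvACnt_succ N M pvEven, pvACnt_succ N M pvOdd]
    by_cases hdvd : (M + 1) ∣ N
    · have h0 : PySem.Int.mod (N : Int) ((M : Int) + 1) = 0 := by
        rw [hmodN, Nat.mod_eq_zero_of_dvd hdvd]; rfl
      by_cases hpar : (M + 1) % 2 = 0
      · have h2 : PySem.Int.mod ((M : Int) + 1) 2 = 0 := by rw [hmod2, hpar]; rfl
        rw [if_pos h0, if_pos h2]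
        have he : pvEven (M + 1) = true := by simp [pvEven, hpar]
        have ho : pvOdd (M + 1) = false := by simp only [pvOdd]; simp; omega
        have c1 : (if (M + 1) ∣ N ∧ pvEven (M + 1) = true then (1 : Nat) else 0) = 1 := by
          simp [hdvd, he]
        have c2 : (if (M + 1) ∣ N ∧ pvOdd (M + 1) = true then (1 : Nat) else 0) = 0 := by
          simp [ho]
        rw [c1, c2]
        simp only [Prod.mk.injEq]
        constructor <;> (push_cast; ring)
      · have h2 : PySem.Int.mod ((M : Int) + 1) 2 ≠ 0 := by
          rw [hmod2]
          intro h
          exact hpar (by exact_mod_cast h)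
        rw [if_pos h0, if_neg h2]
        have he : pvEven (M + 1) = false := by simp only [pvEven]; simp; omega
        have ho : pvOdd (M + 1) = true := by
          simp only [pvOdd]
          simp
          omega
        have c1 : (if (M + 1) ∣ N ∧ pvEven (M + 1) = true then (1 : Nat) else 0) = 0 := by
          simp [he]
        have c2 : (if (M + 1) ∣ N ∧ pvOdd (M + 1) = true then (1 : Nat) else 0) = 1 := by
          simp [hdvd, ho]
        rw [c1, c2]
        simp only [Prod.mk.injEq]
        constructor <;> (push_cast; ring)
    · have h0 : PySem.Int.mod (N : Int) ((M : Int) + 1) ≠ 0 := by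
        rw [hmodN]
        intro h
        exact hdvd (Nat.dvd_of_mod_eq_zero (by exact_mod_cast h))
      rw [if_neg h0]
      have c1 : (if (M + 1) ∣ N ∧ pvEven (M + 1) = true then (1 : Nat) else 0) = 0 := by
        simp [hdvd]
      have c2 : (if (M + 1) ∣ N ∧ pvOdd (M + 1) = true then (1 : Nat) else 0) = 0 := by
        simp [hdvd]
      rw [c1, c2]
      simp

-- A's total count at M = N is the divisor count
lemma pvACnt_full (N : Nat) (_hN : N ≠ 0) (p : Nat → Bool) :
    pvACnt N N p = ((N.divisors).filter (fun d => p d = true)).card := by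
  unfold pvACnt
  rw [Nat.divisors, Finset.filter_filter]

theorem count_even_odd_divisors_spec : Claim_equal_count_even_odd_divisors := by
  intro n _
  unfold Spec_count_even_odd_divisors count_even_odd_divisors count_even_odd_divisors_alt
  by_cases hpos : 0 < n
  · obtain ⟨N, rfl⟩ : ∃ N : Nat, n = (N : Int) := ⟨n.toNat, (Int.toNat_of_nonneg (by omega)).symm⟩
    have hN : N ≠ 0 := by
      intro h
      subst h
      simp at hpos
    have hA := pvAFold_eq N N (0 : Int) (0 : Int)
    have hB := pvBLoop_eq N hN (N + 1) 1 0 0 (by omega)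
      (by nlinarith [Nat.le_refl N])
    have htn : ((N : Int)).toNat = N := by simp
    simp only [htn]
    simp only [Nat.cast_one] at hB
    rw [hA, hB]
    rw [pvACnt_full N hN pvEven, pvACnt_full N hN pvOdd, pvCnt_one N hN pvEven,
      pvCnt_one N hN pvOdd]
  · have hnil : PySem.List.pyRange 1 (n + 1) 1 = [] :=
      PySem.List.pyRange_one_eq_nil (by omega)
    have hloop : pvBLoop n 1 0 0 (n.toNat + 1) = (0, 0) := by
      have htn : n.toNat = 0 := by omega
      rw [htn]
      simp only [pvBLoop]
      rw [if_neg (by omega : ¬ (1 : Int) * 1 ≤ n)]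
    simp [hnil, hloop]
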